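-- pv_equiv track=rewrite | github.com/Oluwafemi-Israel/hackerrank-problems | src/hackerrank/medium/snakes_and_ladders.py | construct_board
-- ===== SOURCE A (Python) =====
-- def construct_board(row_width, end):
--     k = 0
--     board = []
--     for i in range(row_width, end + 1, row_width):
--         row = []
--         for k in range(k + 1, i + 1):
--             row.append(k)
--         board.append(row)
--     return board
-- ===== SOURCE B (Python) =====
-- def construct_board(row_width, end):
--     rows = range(row_width, end + 1, row_width)
--     total = row_width * len(rows)
--     flat = list(range(1, total + 1))
--     return [flat[j:j + row_width] for j in range(0, total, row_width)]
-- ===== Notes on version B (the rewrite author's own statement) =====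
-- stated objective: alternative
-- what changed: B materialises the whole flat sequence 1..row_width*len(rows) once and reshapes it into rows by slicing, instead of A's element-by-element appends with a counter carried across nested loops.
-- outside the precondition, e.g. on construct_board(0, 5): A raises ValueError, B raises ValueError
import Mathlib
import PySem

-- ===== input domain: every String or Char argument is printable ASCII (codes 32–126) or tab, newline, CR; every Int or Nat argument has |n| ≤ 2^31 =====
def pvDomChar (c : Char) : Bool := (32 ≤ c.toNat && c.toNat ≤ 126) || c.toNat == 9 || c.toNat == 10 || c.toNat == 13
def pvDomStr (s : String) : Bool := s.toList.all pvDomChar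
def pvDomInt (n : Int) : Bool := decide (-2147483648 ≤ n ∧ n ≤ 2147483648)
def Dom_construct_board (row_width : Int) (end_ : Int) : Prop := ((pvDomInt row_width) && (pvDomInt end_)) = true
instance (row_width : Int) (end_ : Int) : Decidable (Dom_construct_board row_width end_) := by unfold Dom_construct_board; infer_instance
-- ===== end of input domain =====

-- B builds the flat sequence 1..row_width*len(rows) once and reshapes it by slicing, instead of A's
-- per-element appends with a counter carried across nested loops (objective: alternative decomposition).

-- ===== PORT A =====
def construct_board (row_width : Int) (end_ : Int) : List (List Int) :=
  -- k = 0; board = []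
  -- for i in range(row_width, end + 1, row_width): row = []; for k in range(k+1, i+1): row.append(k); board.append(row)
  let fin := (PySem.List.pyRange row_width (end_ + 1) row_width).foldl
    (fun (st : Int × List (List Int)) i =>
      let inner := (PySem.List.pyRange (st.1 + 1) (i + 1) 1).foldl
        (fun (acc : Int × List Int) k => (k, acc.2 ++ [k])) (st.1, [])
      (inner.1, st.2 ++ [inner.2]))
    ((0 : Int), ([] : List (List Int)))
  fin.2

-- ===== PORT B =====
def construct_board_alt (row_width : Int) (end_ : Int) : List (List Int) :=
  let rows := PySem.List.pyRange row_width (end_ + 1) row_width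
  let total := row_width * (rows.length : Int)
  let flat := PySem.List.pyRange 1 (total + 1) 1
  (PySem.List.pyRange 0 total row_width).map
    (fun j => PySem.List.slice flat (some j) (some (j + row_width)))

-- ===== PRECONDITION & SPEC =====
-- Pre_ excludes only row_width = 0, where Python's range(..., 0) raises ValueError in A (and in B).
def Pre_construct_board (row_width : Int) (end_ : Int) : Prop := row_width ≠ 0
instance (row_width : Int) (end_ : Int) : Decidable (Pre_construct_board row_width end_) := by unfold Pre_construct_board; infer_instance
def pvWitness_construct_board : Int × Int := (3, 10)

def Spec_construct_board (row_width : Int) (end_ : Int) (out : List (List Int)) : Prop := out = construct_board_alt row_width end_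
instance (row_width : Int) (end_ : Int) (out : List (List Int)) : Decidable (Spec_construct_board row_width end_ out) := by unfold Spec_construct_board; infer_instance

-- ===== CLAIM (what is proved, stated in full; the proofs are below) =====
def Claim_equal_construct_board : Prop := ∀ (row_width : Int) (end_ : Int), Dom_construct_board row_width end_ → Pre_construct_board row_width end_ → Spec_construct_board row_width end_ (construct_board row_width end_)

-- ===== LEMMAS AND PROOFS =====

-- A's inner loop: appending every element of l, the loop variable ends at the last element.
theorem pv_inner_fold (l : List Int) : ∀ (k : Int) (row : List Int),
    l.foldl (fun (acc : Int × List Int) k' => (k', acc.2 ++ [k'])) (k, row) = (l.getLastD k, row ++ l) := by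
  induction l with
  | nil => intro k row; simp
  | cons a t ih =>
    intro k row
    rw [List.foldl_cons, ih]
    cases t with
    | nil => simp
    | cons b t' =>
      rcases h : (b :: t').getLast? with _ | x
      · simp at h
      · simp [List.getLastD]

theorem pv_getLastD_pyRange_one (a b d : Int) (h : a < b) :
    (PySem.List.pyRange a b 1).getLastD d = b - 1 := by
  have hb : a ≤ b - 1 := by omega
  have h2 : PySem.List.pyRange a b 1 = PySem.List.pyRange a (b - 1) 1 ++ [b - 1] := by
    have h3 := PySem.List.pyRange_one_succ_right (a := a) (b := b - 1) hb
    rw [show b - 1 + 1 = b by ring] at h3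
    exact h3
  rw [h2]
  simp

theorem pv_count_if (s : Int) (n : Nat) (hs : 0 < s) :
    (if 0 < s * (n : Int) then ((s * (n : Int) + s - 1) / s).toNat else 0) = n := by
  rcases Nat.eq_zero_or_pos n with h0 | h0
  · subst h0; simp
  · have hpos : 0 < s * (n : Int) := by positivity
    rw [if_pos hpos]
    have h1 : s * (n : Int) + s - 1 = (s - 1) + s * (n : Int) := by ring
    rw [h1, Int.add_mul_ediv_left _ _ (by omega : s ≠ 0),
        Int.ediv_eq_zero_of_lt (by omega) (by omega)]
    simp

theorem pv_pyRange_zero_mul (s : Int) (n : Nat) (hs : 0 < s) :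
    PySem.List.pyRange 0 (s * (n : Int)) s = (List.range n).map (fun t : Nat => (s * t : Int)) := by
  rw [PySem.List.pyRange_of_pos _ _ hs]
  have h1 : (if (0 : Int) < s * (n : Int) then ((s * (n : Int) - 0 + s - 1) / s).toNat else 0) = n := by
    rw [show s * (n : Int) - 0 + s - 1 = s * (n : Int) + s - 1 by ring]
    exact pv_count_if s n hs
  rw [h1]
  simp

theorem pv_pyRange_len_map (a b s : Int) (hs : 0 < s) :
    PySem.List.pyRange a b s = (List.range (PySem.List.pyRange a b s).length).map (fun k : Nat => (a + s * k : Int)) := by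
  conv_lhs => rw [PySem.List.pyRange_of_pos _ _ hs]
  rw [PySem.List.pyRange_of_pos _ _ hs]
  simp

-- A's outer loop for a positive step: k tracks rw*n and the rows are consecutive ranges.
theorem pv_A_loop_pos (rw : Int) (hrw : 0 < rw) (n : Nat) :
    (((List.range n).map (fun t : Nat => (rw + rw * t : Int))).foldl
      (fun (st : Int × List (List Int)) i =>
        let inner := (PySem.List.pyRange (st.1 + 1) (i + 1) 1).foldl
          (fun (acc : Int × List Int) k => (k, acc.2 ++ [k])) (st.1, [])
        (inner.1, st.2 ++ [inner.2]))
      ((0 : Int), ([] : List (List Int))))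
    = (rw * (n : Int),
       (List.range n).map (fun t : Nat => PySem.List.pyRange (rw * t + 1) (rw * t + rw + 1) 1)) := by
  induction n with
  | zero => simp
  | succ m ih =>
    rw [List.range_succ, List.map_append, List.foldl_append, ih]
    simp only [List.map_cons, List.map_nil, List.foldl_cons, List.foldl_nil]
    rw [pv_inner_fold]
    rw [pv_getLastD_pyRange_one _ _ _ (by nlinarith)]
    simp only [Prod.mk.injEq, List.nil_append]
    refine ⟨by push_cast; ring, ?_⟩
    rw [List.map_append]
    simp only [List.map_cons, List.map_nil]
    congr 3 <;> push_cast <;> ring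

-- B's slice of the flat range is exactly one consecutive chunk.
theorem pv_slice_chunk (rw : Int) (hrw : 0 < rw) (n t : Nat) (ht : t < n) :
    PySem.List.slice (PySem.List.pyRange 1 (rw * (n : Int) + 1) 1) (some (rw * (t : Int))) (some (rw * (t : Int) + rw))
      = PySem.List.pyRange (rw * (t : Int) + 1) (rw * (t : Int) + rw + 1) 1 := by
  have htn : (t : Int) + 1 ≤ (n : Int) := by exact_mod_cast ht
  have h1 : (1 : Int) ≤ rw * (t : Int) + 1 := by nlinarith
  have h2 : rw * (t : Int) + 1 ≤ rw * (n : Int) + 1 := by nlinarith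
  have h3 : rw * (t : Int) + rw + 1 ≤ rw * (n : Int) + 1 := by nlinarith
  rw [PySem.List.slice_toNat]
  rw [PySem.List.pyRange_one_append 1 (rw * (t : Int) + 1) (rw * (n : Int) + 1) h1 h2]
  rw [List.drop_left' (by rw [PySem.List.length_pyRange_one]; omega)]
  rw [PySem.List.pyRange_one_append (rw * (t : Int) + 1) (rw * (t : Int) + rw + 1) (rw * (n : Int) + 1) (by nlinarith) h3]
  rw [List.take_left' (by rw [PySem.List.length_pyRange_one]; omega)]
  all_goals nlinarith

-- Negative step: every element of the outer range is negative.
theorem pv_mem_neg (rw b i : Int) (hrw : rw < 0) (hi : i ∈ PySem.List.pyRange rw b rw) : i < 0 := by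
  simp only [PySem.List.pyRange, if_neg (by omega : ¬ rw = 0)] at hi
  rcases List.mem_map.mp hi with ⟨k, _, hk⟩
  have : rw * (k : Int) ≤ 0 := mul_nonpos_of_nonpos_of_nonneg (by omega) (by positivity)
  omega

-- A's outer loop over negative row ends: every inner range is empty, k stays 0.
theorem pv_A_loop_neg (l : List Int) (hneg : ∀ i ∈ l, i < 0) : ∀ (board : List (List Int)),
    (l.foldl
      (fun (st : Int × List (List Int)) i =>
        let inner := (PySem.List.pyRange (st.1 + 1) (i + 1) 1).foldl
          (fun (acc : Int × List Int) k => (k, acc.2 ++ [k])) (st.1, [])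
        (inner.1, st.2 ++ [inner.2]))
      ((0 : Int), board))
    = (0, board ++ List.replicate l.length []) := by
  induction l with
  | nil => intro board; simp
  | cons a t ih =>
    intro board
    rw [List.foldl_cons]
    have ha : a < 0 := hneg a List.mem_cons_self
    have he : PySem.List.pyRange ((0 : Int) + 1) (a + 1) 1 = [] := PySem.List.pyRange_one_eq_nil (by omega)
    simp only [he, List.foldl_nil]
    rw [ih (fun i hi => hneg i (List.mem_cons_of_mem a hi))]
    simp [List.replicate_succ, List.append_assoc]

-- slices of the empty list are empty
theorem pv_slice_nil (a b : Int) : PySem.List.slice ([] : List Int) (some a) (some b) = [] := by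
  apply List.eq_nil_of_length_eq_zero
  have h := PySem.List.length_slice ([] : List Int) a b
  have h1 := PySem.List.clampIdx_le ([] : List Int).length b
  have h2 := PySem.List.clampIdx_le ([] : List Int).length a
  have hl : ([] : List Int).length = 0 := rfl
  omega

-- length of B's chunk-start range (works for either sign of the step)
theorem pv_len_chunk_range (rw : Int) (n : Nat) (hrw : rw ≠ 0) :
    (PySem.List.pyRange 0 (rw * (n : Int)) rw).length = n := by
  rcases lt_or_gt_of_ne hrw with h | h
  · simp only [PySem.List.pyRange, if_neg hrw, if_neg (by omega : ¬ (0 : Int) < rw)]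
    rw [List.length_map, List.length_range]
    have hneg' : -rw * (n : Int) = -(rw * (n : Int)) := by ring
    by_cases hc : rw * (n : Int) < 0
    · have hc' : 0 < -rw * (n : Int) := by omega
      have hcount := pv_count_if (-rw) n (by omega)
      rw [if_pos hc'] at hcount
      rw [if_pos hc, show (0 : Int) - rw * (n : Int) + -rw - 1 = -rw * (n : Int) + -rw - 1 by ring]
      exact hcount
    · rw [if_neg hc]
      have hn0 : n = 0 := by
        by_contra h0
        have hp : 0 < (n : Int) := by exact_mod_cast Nat.pos_of_ne_zero h0
        nlinarith
      omega
  · rw [pv_pyRange_zero_mul rw n h]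
    simp

theorem construct_board_spec : Claim_equal_construct_board := by
  intro rw end_ _ hpre
  unfold Spec_construct_board construct_board construct_board_alt
  dsimp only
  rcases lt_or_gt_of_ne hpre with hneg | hpos
  · -- negative row_width: both sides are n empty rows
    have hA := pv_A_loop_neg (PySem.List.pyRange rw (end_ + 1) rw)
      (fun i hi => pv_mem_neg rw (end_ + 1) i hneg hi) []
    dsimp only at hA
    rw [hA]
    dsimp only
    have hflat : PySem.List.pyRange 1 (rw * ((PySem.List.pyRange rw (end_ + 1) rw).length : Int) + 1) 1 = [] := by
      apply PySem.List.pyRange_one_eq_nil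
      have : rw * ((PySem.List.pyRange rw (end_ + 1) rw).length : Int) ≤ 0 :=
        mul_nonpos_of_nonpos_of_nonneg (by omega) (by positivity)
      omega
    rw [hflat, List.nil_append]
    symm
    rw [List.eq_replicate_iff]
    refine ⟨?_, ?_⟩
    · rw [List.length_map, pv_len_chunk_range rw _ hpre]
    · intro x hx
      rcases List.mem_map.mp hx with ⟨j, _, hj⟩
      rw [← hj, pv_slice_nil]
  · -- positive row_width
    set n := (PySem.List.pyRange rw (end_ + 1) rw).length with hn
    have hrows : PySem.List.pyRange rw (end_ + 1) rw
        = (List.range n).map (fun t : Nat => (rw + rw * t : Int)) := by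
      rw [hn]; exact pv_pyRange_len_map rw (end_ + 1) rw hpos
    have hA := pv_A_loop_pos rw hpos n
    dsimp only at hA
    rw [hrows, hA]
    dsimp only
    rw [pv_pyRange_zero_mul rw n hpos, List.map_map]
    apply List.map_congr_left
    intro t ht
    rw [Function.comp_apply, pv_slice_chunk rw hpos n t (List.mem_range.mp ht)]
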